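-- pv_equiv track=rewrite | github.com/DrDonut326/AdventofCode | 2016/Day 7.py | does_code_support_SSL
-- ===== SOURCE A (Python) =====
-- def split_hypernets(s):
--     """Returns a list of chunks of non and hyper strings"""
--     non = []
--     hyper = []
--     non_write = True
--     chunk = ''
--     for x in s:
--         if x == '[' or x == ']':
--             if len(chunk) > 0:
--                 if non_write:
--                     non.append(chunk)
--                 else:
--                     hyper.append(chunk)
--             non_write = not non_write
--             chunk = ''
--         else:
--             chunk += x
--     if len(chunk) > 0:
--         if non_write:
--             non.append(chunk)
--         else:
--             hyper.append(chunk)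
--     return non, hyper
--
-- def get_ABAs(supernet_list):
--     ans = []
--     for s in supernet_list:
--         if len(s) < 3:
--             continue
--         for a, b, c in zip(s, s[1:], s[2:]):
--             if a == c and a != b:
--                 ans.append(f"{a}{b}{a}")
--     return ans
--
-- def get_ABA_inverse(aba):
--     assert len(aba) == 3
--     return aba[1] + aba[0] + aba[1]
--
-- def does_code_support_SSL(code):
--     supernet, hypernet = split_hypernets(code)
--     list_of_ABAs = get_ABAs(supernet)
--     list_of_BABs = get_ABAs(hypernet)
--     for aba in list_of_ABAs:
--         if get_ABA_inverse(aba) in list_of_BABs: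
--             return True
--     return False
-- ===== SOURCE B (Python) =====
-- def does_code_support_SSL(code):
--     abas, babs = set(), set()
--     inside = False
--     w = ''  # last two characters of the current chunk
--     for ch in code:
--         if ch == '[' or ch == ']':
--             inside = not inside
--             w = ''
--         else:
--             if len(w) == 2:
--                 a, b = w
--                 if a == ch and a != b:
--                     (babs if inside else abas).add((ch, b))
--             w = w[-1:] + ch
--     return any((b, a) in babs for (a, b) in abas)
-- ===== Notes on version B (the rewrite author's own statement) =====
-- stated objective: alternative
-- what changed: B replaces A's three-phase pipeline (split the string into supernet/hypernet chunk lists, build ABA string lists per side, then a quadratic membership scan of inverses) by a single streaming pass over the characters that keeps only a 2-character window and two sets of (a,b) pairs, finishing with one set-intersection test.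
import Mathlib
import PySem

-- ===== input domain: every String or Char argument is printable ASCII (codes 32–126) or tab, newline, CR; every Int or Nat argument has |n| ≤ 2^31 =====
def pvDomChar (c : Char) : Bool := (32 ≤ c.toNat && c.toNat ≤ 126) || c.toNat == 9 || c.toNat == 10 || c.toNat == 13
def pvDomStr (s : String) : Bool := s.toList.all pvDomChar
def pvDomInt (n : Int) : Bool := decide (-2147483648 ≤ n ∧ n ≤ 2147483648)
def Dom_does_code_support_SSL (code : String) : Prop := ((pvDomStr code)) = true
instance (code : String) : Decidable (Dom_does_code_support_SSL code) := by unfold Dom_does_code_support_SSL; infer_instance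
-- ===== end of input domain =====

-- B replaces A's split-into-segment-lists + per-segment ABA lists + quadratic inverse lookup
-- by one streaming pass with a 2-char window collecting ABA/BAB pairs into two sets (return value only; neither mutates).

-- ===== PORT A =====
-- loop body of split_hypernets' for-loop (state: non, hyper, non_write, chunk)
def pvStepA (st : List (List Char) × List (List Char) × Bool × List Char) (x : Char) :
    List (List Char) × List (List Char) × Bool × List Char :=
  match st with
  | (non, hyper, nw, chunk) =>
    if x = '[' ∨ x = ']' then
      if chunk.length > 0 then
        if nw then (non ++ [chunk], hyper, !nw, ([] : List Char))
        else (non, hyper ++ [chunk], !nw, [])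
      else (non, hyper, !nw, [])
    else (non, hyper, nw, chunk ++ [x])

def split_hypernets (s : List Char) : List (List Char) × List (List Char) :=
  match s.foldl pvStepA ([], [], true, []) with
  | (non, hyper, nw, chunk) =>
    if chunk.length > 0 then
      if nw then (non ++ [chunk], hyper) else (non, hyper ++ [chunk])
    else (non, hyper)

-- zip(s, s[1:], s[2:]) with the conditional append of f"{a}{b}{a}"
def get_ABAs (l : List (List Char)) : List (List Char) :=
  l.foldl (fun ans s =>
    if s.length < 3 then ans
    else ((s.zip (PySem.List.slice s (some 1))).zip (PySem.List.slice s (some 2))).foldl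
      (fun ans t => if t.1.1 = t.2 ∧ t.1.1 ≠ t.1.2 then ans ++ [[t.1.1, t.1.2, t.1.1]] else ans) ans) []

-- aba[1] + aba[0] + aba[1]; the assert never fires (every caller passes a length-3 string)
def get_ABA_inverse (aba : List Char) : List Char :=
  match PySem.List.pyGet? aba 1, PySem.List.pyGet? aba 0 with
  | some b, some a => [b, a, b]
  | _, _ => []

def does_code_support_SSL (code : String) : Bool :=
  match split_hypernets code.toList with
  | (supernet, hypernet) =>
    let list_of_ABAs := get_ABAs supernet
    let list_of_BABs := get_ABAs hypernet
    list_of_ABAs.any (fun aba => list_of_BABs.contains (get_ABA_inverse aba))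

-- ===== PORT B =====
-- loop body of B's single for-loop (state: abas, babs, inside, w); w[-1:] is slice (some (-1))
def pvStepB (st : PySem.Set (Char × Char) × PySem.Set (Char × Char) × Bool × List Char) (ch : Char) :
    PySem.Set (Char × Char) × PySem.Set (Char × Char) × Bool × List Char :=
  match st with
  | (abas, babs, inside, w) =>
    if ch = '[' ∨ ch = ']' then (abas, babs, !inside, ([] : List Char))
    else
      let p :=
        match w with
        | [a, b] =>
          if a = ch ∧ a ≠ b then
            if inside then (abas, PySem.Set.add babs (ch, b)) else (PySem.Set.add abas (ch, b), babs)
          else (abas, babs)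
        | _ => (abas, babs)
      (p.1, p.2, inside, PySem.List.slice w (some (-1)) ++ [ch])

def does_code_support_SSL_alt (code : String) : Bool :=
  match code.toList.foldl pvStepB (PySem.Set.empty, PySem.Set.empty, false, []) with
  | (abas, babs, _, _) => abas.any (fun ab => PySem.Set.contains babs (ab.2, ab.1))

-- ===== PRECONDITION & SPEC =====
def Spec_does_code_support_SSL (code : String) (out : Bool) : Prop := out = does_code_support_SSL_alt code
instance (code : String) (out : Bool) : Decidable (Spec_does_code_support_SSL code out) := by unfold Spec_does_code_support_SSL; infer_instance

-- ===== CLAIM (what is proved, stated in full; the proofs are below) =====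
def Claim_equal_does_code_support_SSL : Prop := ∀ (code : String), Dom_does_code_support_SSL code → Spec_does_code_support_SSL code (does_code_support_SSL code)

-- ===== LEMMAS AND PROOFS =====

-- a pair (a, b) is an ABA of one of the chunks of l
def pvOcc (l : List (List Char)) (p : Char × Char) : Prop :=
  p.1 ≠ p.2 ∧ ∃ s ∈ l, [p.1, p.2, p.1] <:+: s

theorem pv_slice_one (s : List Char) : PySem.List.slice s (some 1) = s.drop 1 := by
  simpa using PySem.List.slice_from s (a := 1) (by norm_num)

theorem pv_slice_two (s : List Char) : PySem.List.slice s (some 2) = s.drop 2 := by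
  simpa using PySem.List.slice_from s (a := 2) (by norm_num)

theorem pv_slice_neg_one (s : List Char) : PySem.List.slice s (some (-1)) = s.drop (s.length - 1) := by
  rcases s with _ | ⟨x, t⟩
  · rfl
  · show PySem.List.slice (x :: t) (some (-1)) = _
    rw [PySem.List.slice]
    rw [show PySem.List.clampIdx (x :: t).length (-1) = (x :: t).length - 1 by
      simp [PySem.List.clampIdx]]
    rw [show (x :: t).length - ((x :: t).length - 1) = 1 by simp]
    exact List.take_of_length_le (by simp)

-- consecutive-triples membership is infix
theorem pv_triples_mem (s : List Char) (a b c : Char) :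
    ((a, b), c) ∈ (s.zip (s.drop 1)).zip (s.drop 2) ↔ [a, b, c] <:+: s := by
  induction s with
  | nil => simp
  | cons x t ih =>
    rcases t with _ | ⟨y, u⟩
    · simp [List.infix_cons_iff]
    · rcases u with _ | ⟨z, v⟩
      · simp [List.infix_cons_iff, List.cons_prefix_cons]
      · simp only [List.drop_succ_cons, List.drop_zero, List.zip_cons_cons, List.mem_cons,
          Prod.mk.injEq] at *
        rw [List.infix_cons_iff, List.cons_prefix_cons, List.cons_prefix_cons, List.cons_prefix_cons]
        simp only [List.nil_prefix, and_true]
        tauto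

theorem pv_inner_mem (tr : List ((Char × Char) × Char)) (acc : List (List Char)) (t : List Char) :
    t ∈ tr.foldl (fun ans t => if t.1.1 = t.2 ∧ t.1.1 ≠ t.1.2 then ans ++ [[t.1.1, t.1.2, t.1.1]] else ans) acc
      ↔ t ∈ acc ∨ ∃ a b, t = [a, b, a] ∧ a ≠ b ∧ ((a, b), a) ∈ tr := by
  induction tr generalizing acc with
  | nil => simp
  | cons u tr ih =>
    obtain ⟨⟨ua, ub⟩, uc⟩ := u
    simp only [List.foldl_cons, ih, List.mem_cons]
    by_cases h : ua = uc ∧ ua ≠ ub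
    · obtain ⟨h1, hne⟩ := h
      subst h1
      rw [if_pos (show ua = ua ∧ ua ≠ ub from ⟨rfl, hne⟩)]
      simp only [List.mem_append, List.mem_singleton]
      constructor
      · rintro (⟨ht | rfl⟩ | ⟨a, b, rfl, hab, hm⟩)
        · exact Or.inl ht
        · exact Or.inr ⟨ua, ub, rfl, hne, Or.inl rfl⟩
        · exact Or.inr ⟨a, b, rfl, hab, Or.inr hm⟩
      · rintro (ht | ⟨a, b, rfl, hab, hm | hm⟩)
        · exact Or.inl (Or.inl ht)
        · obtain ⟨⟨rfl, rfl⟩, -⟩ : (a = ua ∧ b = ub) ∧ a = ua := by simpa [Prod.ext_iff] using hm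
          exact Or.inl (Or.inr rfl)
        · exact Or.inr ⟨a, b, rfl, hab, hm⟩
    · rw [if_neg h]
      constructor
      · rintro (ht | ⟨a, b, rfl, hab, hm⟩)
        · exact Or.inl ht
        · exact Or.inr ⟨a, b, rfl, hab, Or.inr hm⟩
      · rintro (ht | ⟨a, b, rfl, hab, hm | hm⟩)
        · exact Or.inl ht
        · cases hm
          exact absurd ⟨rfl, hab⟩ h
        · exact Or.inr ⟨a, b, rfl, hab, hm⟩

theorem pv_get_ABAs_acc (l : List (List Char)) (acc : List (List Char)) (t : List Char) :
    t ∈ l.foldl (fun ans s =>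
      if s.length < 3 then ans
      else ((s.zip (PySem.List.slice s (some 1))).zip (PySem.List.slice s (some 2))).foldl
        (fun ans t => if t.1.1 = t.2 ∧ t.1.1 ≠ t.1.2 then ans ++ [[t.1.1, t.1.2, t.1.1]] else ans) ans) acc
      ↔ t ∈ acc ∨ ∃ a b, t = [a, b, a] ∧ a ≠ b ∧ ∃ s ∈ l, [a, b, a] <:+: s := by
  induction l generalizing acc with
  | nil => simp
  | cons s l ih =>
    rw [List.foldl_cons]
    simp only [pv_slice_one, pv_slice_two] at ih ⊢
    rw [ih]
    by_cases hs : s.length < 3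
    · rw [if_pos hs]
      constructor
      · rintro (ht | ⟨a, b, rfl, hab, w, hw, hinf⟩)
        · exact Or.inl ht
        · exact Or.inr ⟨a, b, rfl, hab, w, List.mem_cons_of_mem _ hw, hinf⟩
      · rintro (ht | ⟨a, b, rfl, hab, w, hw, hinf⟩)
        · exact Or.inl ht
        · rcases List.mem_cons.mp hw with rfl | hw
          · have h3 : ([a, b, a] : List Char).length ≤ w.length := hinf.length_le
            simp at h3; omega
          · exact Or.inr ⟨a, b, rfl, hab, w, hw, hinf⟩
    · rw [if_neg hs, pv_inner_mem]
      constructor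
      · rintro ((ht | ⟨a, b, rfl, hab, hm⟩) | ⟨a, b, rfl, hab, w, hw, hinf⟩)
        · exact Or.inl ht
        · exact Or.inr ⟨a, b, rfl, hab, s, List.mem_cons_self .., (pv_triples_mem s a b a).mp hm⟩
        · exact Or.inr ⟨a, b, rfl, hab, w, List.mem_cons_of_mem _ hw, hinf⟩
      · rintro (ht | ⟨a, b, rfl, hab, w, hw, hinf⟩)
        · exact Or.inl (Or.inl ht)
        · rcases List.mem_cons.mp hw with rfl | hw
          · exact Or.inl (Or.inr ⟨a, b, rfl, hab, (pv_triples_mem w a b a).mpr hinf⟩)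
          · exact Or.inr ⟨a, b, rfl, hab, w, hw, hinf⟩

-- membership in get_ABAs
theorem pv_mem_get_ABAs (l : List (List Char)) (t : List Char) :
    t ∈ get_ABAs l ↔ ∃ a b, t = [a, b, a] ∧ a ≠ b ∧ ∃ s ∈ l, [a, b, a] <:+: s := by
  rw [get_ABAs, pv_get_ABAs_acc]
  simp

-- trailing triple after appending one char
theorem pv_infix_concat (s : List Char) (c x y z : Char) :
    [x, y, z] <:+: (s ++ [c]) ↔ [x, y, z] <:+: s ∨ (z = c ∧ [x, y] <:+ s) := by
  have h0 : [x, y, z] <:+: (s ++ [c]) ↔ [z, y, x] <:+: (c :: s.reverse) := by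
    rw [← List.reverse_infix]; simp
  rw [h0, List.infix_cons_iff, List.cons_prefix_cons]
  have h1 : ([y, x] : List Char) <+: s.reverse ↔ [x, y] <:+ s := by
    rw [show ([y, x] : List Char) = [x, y].reverse from rfl, List.reverse_prefix]
  have h2 : ([z, y, x] : List Char) <:+: s.reverse ↔ [x, y, z] <:+: s := by
    rw [show ([z, y, x] : List Char) = [x, y, z].reverse from rfl, ← List.reverse_infix]
    simp
  rw [h1, h2]
  tauto

-- the 2-char window is the drop form of the 2-suffix
theorem pv_window_eq_two (l : List Char) (a b : Char) :
    l.drop (l.length - 2) = [a, b] ↔ [a, b] <:+ l := by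
  constructor
  · intro h
    rw [← h]
    exact List.drop_suffix _ _
  · intro h
    obtain ⟨u, rfl⟩ := h
    have : (u ++ [a, b]).length - 2 = u.length := by simp
    rw [this, List.drop_left]

theorem pv_window_step (l : List Char) (c : Char) :
    (l ++ [c]).drop ((l ++ [c]).length - 2)
      = PySem.List.slice (l.drop (l.length - 2)) (some (-1)) ++ [c] := by
  rw [pv_slice_neg_one, List.drop_drop]
  have h1 : (l ++ [c]).length - 2 = l.length - 1 := by
    simp only [List.length_append, List.length_cons, List.length_nil]; omega
  have h2 : l.length - 2 + ((l.drop (l.length - 2)).length - 1) = l.length - 1 := by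
    simp only [List.length_drop]; omega
  rw [h1, h2]
  exact List.drop_append_of_le_length (by omega)

theorem pvOcc_append_nil (l : List (List Char)) (p : Char × Char) :
    pvOcc (l ++ [[]]) p ↔ pvOcc l p := by
  simp only [pvOcc, List.mem_append, List.mem_singleton]
  constructor
  · rintro ⟨hne, w, (hw | rfl), hinf⟩
    · exact ⟨hne, w, hw, hinf⟩
    · simp at hinf
  · rintro ⟨hne, w, hw, hinf⟩
    exact ⟨hne, w, Or.inl hw, hinf⟩

-- appending one char to the last chunk
theorem pvOcc_concat (l : List (List Char)) (s : List Char) (c : Char) (p : Char × Char) :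
    pvOcc (l ++ [s ++ [c]]) p ↔ pvOcc (l ++ [s]) p ∨ (p.1 ≠ p.2 ∧ p.1 = c ∧ [p.1, p.2] <:+ s) := by
  simp only [pvOcc, List.mem_append, List.mem_singleton]
  constructor
  · rintro ⟨hne, w, (hw | rfl), hinf⟩
    · exact Or.inl ⟨hne, w, Or.inl hw, hinf⟩
    · rcases (pv_infix_concat s c p.1 p.2 p.1).mp hinf with h | ⟨rfl, h⟩
      · exact Or.inl ⟨hne, s, Or.inr rfl, h⟩
      · exact Or.inr ⟨hne, rfl, h⟩
  · rintro (⟨hne, w, hw | hws, hinf⟩ | ⟨hne, hc, h⟩)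
    · exact ⟨hne, w, Or.inl hw, hinf⟩
    · subst hws
      exact ⟨hne, w ++ [c], Or.inr rfl, hinf.trans (List.prefix_append w [c]).isInfix⟩
    · exact ⟨hne, s ++ [c], Or.inr rfl, ((pv_infix_concat s c p.1 p.2 p.1).mpr (Or.inr ⟨hc, h⟩))⟩

-- the coupling invariant between A's split state and B's streaming state
def pvR (sa : List (List Char) × List (List Char) × Bool × List Char)
    (sb : PySem.Set (Char × Char) × PySem.Set (Char × Char) × Bool × List Char) : Prop :=
  sb.2.2.1 = !sa.2.2.1 ∧
  sb.2.2.2 = sa.2.2.2.drop (sa.2.2.2.length - 2) ∧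
  (∀ p, p ∈ sb.1 ↔ pvOcc (sa.1 ++ if sa.2.2.1 then [sa.2.2.2] else []) p) ∧
  (∀ p, p ∈ sb.2.1 ↔ pvOcc (sa.2.1 ++ if sa.2.2.1 then [] else [sa.2.2.2]) p)




theorem pv_add_iff (S : PySem.Set (Char × Char)) (l : List (List Char)) (chunk : List Char) (x a b : Char)
    (hw : chunk.drop (chunk.length - 2) = [a, b]) (h1 : a = x) (h2 : a ≠ b)
    (hS : ∀ p, p ∈ S ↔ pvOcc (l ++ [chunk]) p) (p : Char × Char) :
    p ∈ PySem.Set.add S (x, b) ↔ pvOcc (l ++ [chunk ++ [x]]) p := by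
  subst h1
  rw [PySem.Set.mem_add, hS p, pvOcc_concat]
  refine or_congr_right ?_
  constructor
  · rintro rfl
    exact ⟨h2, rfl, (pv_window_eq_two chunk a b).mp hw⟩
  · rintro ⟨hne, hx1, hsuf⟩
    have h3 := (pv_window_eq_two chunk p.1 p.2).mpr hsuf
    rw [hw] at h3
    obtain ⟨ha, hb⟩ : p.1 = a ∧ p.2 = b := by simpa using h3.symm
    simp [Prod.ext_iff, ha, hb]

theorem pv_keep_iff_two (S : PySem.Set (Char × Char)) (l : List (List Char)) (chunk : List Char) (x a b : Char)
    (hw : chunk.drop (chunk.length - 2) = [a, b]) (hcond : ¬(a = x ∧ a ≠ b))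
    (hS : ∀ p, p ∈ S ↔ pvOcc (l ++ [chunk]) p) (p : Char × Char) :
    p ∈ S ↔ pvOcc (l ++ [chunk ++ [x]]) p := by
  rw [hS p, pvOcc_concat]
  constructor
  · exact Or.inl
  · rintro (h | ⟨hne, hx1, hsuf⟩)
    · exact h
    · have h3 := (pv_window_eq_two chunk p.1 p.2).mpr hsuf
      rw [hw] at h3
      obtain ⟨ha, hb⟩ : p.1 = a ∧ p.2 = b := by simpa using h3.symm
      exact absurd ⟨ha.symm.trans hx1, fun hab => hne (by rw [ha, hb, hab])⟩ hcond

theorem pv_keep_iff_short (S : PySem.Set (Char × Char)) (l : List (List Char)) (chunk w : List Char) (x : Char)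
    (hw : w = chunk.drop (chunk.length - 2)) (hlen : w.length ≠ 2)
    (hS : ∀ p, p ∈ S ↔ pvOcc (l ++ [chunk]) p) (p : Char × Char) :
    p ∈ S ↔ pvOcc (l ++ [chunk ++ [x]]) p := by
  rw [hS p, pvOcc_concat]
  constructor
  · exact Or.inl
  · rintro (h | ⟨hne, hx1, hsuf⟩)
    · exact h
    · have h3 : w = [p.1, p.2] := hw.trans ((pv_window_eq_two chunk p.1 p.2).mpr hsuf)
      exact absurd (by rw [h3]; rfl) hlen


theorem pvR_step (sa : List (List Char) × List (List Char) × Bool × List Char)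
    (sb : PySem.Set (Char × Char) × PySem.Set (Char × Char) × Bool × List Char)
    (h : pvR sa sb) (x : Char) : pvR (pvStepA sa x) (pvStepB sb x) := by
  obtain ⟨non, hyper, nw, chunk⟩ := sa
  obtain ⟨abas, babs, inside, w⟩ := sb
  obtain ⟨hin, hw, habas, hbabs⟩ := h
  simp only at hin hw habas hbabs
  subst hin
  by_cases hx : x = '[' ∨ x = ']'
  · simp only [pvStepA, pvStepB, if_pos hx]
    by_cases hc : chunk.length > 0
    · rw [if_pos hc]
      cases nw
      · simp only [Bool.false_eq_true, if_false] at habas hbabs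
        refine ⟨rfl, rfl, fun p => ?_, fun p => ?_⟩
        · show p ∈ abas ↔ pvOcc (non ++ [([] : List Char)]) p
          rw [pvOcc_append_nil, ← List.append_nil non]
          exact habas p
        · show p ∈ babs ↔ pvOcc ((hyper ++ [chunk]) ++ []) p
          rw [List.append_nil]
          exact hbabs p
      · simp only [if_true] at habas hbabs
        refine ⟨rfl, rfl, fun p => ?_, fun p => ?_⟩
        · show p ∈ abas ↔ pvOcc ((non ++ [chunk]) ++ []) p
          rw [List.append_nil]
          exact habas p
        · show p ∈ babs ↔ pvOcc (hyper ++ [([] : List Char)]) p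
          rw [pvOcc_append_nil, ← List.append_nil hyper]
          exact hbabs p
    · rw [if_neg hc]
      have hnil : chunk = [] := List.eq_nil_of_length_eq_zero (by omega)
      subst hnil
      cases nw
      · simp only [Bool.false_eq_true, if_false] at habas hbabs
        refine ⟨rfl, rfl, fun p => ?_, fun p => ?_⟩
        · show p ∈ abas ↔ pvOcc (non ++ [([] : List Char)]) p
          rw [pvOcc_append_nil, ← List.append_nil non]
          exact habas p
        · show p ∈ babs ↔ pvOcc (hyper ++ []) p
          rw [List.append_nil]
          exact (hbabs p).trans (pvOcc_append_nil hyper p)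
      · simp only [if_true] at habas hbabs
        refine ⟨rfl, rfl, fun p => ?_, fun p => ?_⟩
        · show p ∈ abas ↔ pvOcc (non ++ []) p
          rw [List.append_nil]
          exact (habas p).trans (pvOcc_append_nil non p)
        · show p ∈ babs ↔ pvOcc (hyper ++ [([] : List Char)]) p
          rw [pvOcc_append_nil, ← List.append_nil hyper]
          exact hbabs p
  · simp only [pvStepA, pvStepB, if_neg hx]
    have hwin : PySem.List.slice w (some (-1)) ++ [x]
        = (chunk ++ [x]).drop ((chunk ++ [x]).length - 2) := by
      rw [hw]; exact (pv_window_step chunk x).symm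
    cases nw
    · -- non_write = False: current chunk is a hypernet; inside = true
      simp only [Bool.false_eq_true, if_false] at habas hbabs
      have habas' : ∀ p, p ∈ abas ↔ pvOcc (non ++ []) p := by
        intro p; rw [List.append_nil]; exact (habas p).trans (by rw [List.append_nil])
      rcases w with _ | ⟨a, t⟩
      · refine ⟨rfl, hwin, fun p => habas' p, fun p => ?_⟩
        show p ∈ babs ↔ pvOcc (hyper ++ [chunk ++ [x]]) p
        exact pv_keep_iff_short babs hyper chunk [] x hw (by simp) hbabs p
      · rcases t with _ | ⟨b, u⟩
        · refine ⟨rfl, hwin, fun p => habas' p, fun p => ?_⟩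
          show p ∈ babs ↔ pvOcc (hyper ++ [chunk ++ [x]]) p
          exact pv_keep_iff_short babs hyper chunk [a] x hw (by simp) hbabs p
        · rcases u with _ | ⟨d, v⟩
          · by_cases hcond : a = x ∧ a ≠ b
            · refine ⟨rfl, hwin, fun p => ?_, fun p => ?_⟩
              · show p ∈ (if a = x ∧ a ≠ b then (abas, PySem.Set.add babs (x, b)) else (abas, babs)).1
                    ↔ pvOcc (non ++ []) p
                rw [if_pos hcond]
                exact habas' p
              · show p ∈ (if a = x ∧ a ≠ b then (abas, PySem.Set.add babs (x, b)) else (abas, babs)).2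
                    ↔ pvOcc (hyper ++ [chunk ++ [x]]) p
                rw [if_pos hcond]
                exact pv_add_iff babs hyper chunk x a b hw.symm hcond.1 hcond.2 hbabs p
            · refine ⟨rfl, hwin, fun p => ?_, fun p => ?_⟩
              · show p ∈ (if a = x ∧ a ≠ b then (abas, PySem.Set.add babs (x, b)) else (abas, babs)).1
                    ↔ pvOcc (non ++ []) p
                rw [if_neg hcond]
                exact habas' p
              · show p ∈ (if a = x ∧ a ≠ b then (abas, PySem.Set.add babs (x, b)) else (abas, babs)).2
                    ↔ pvOcc (hyper ++ [chunk ++ [x]]) p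
                rw [if_neg hcond]
                exact pv_keep_iff_two babs hyper chunk x a b hw.symm hcond hbabs p
          · exfalso
            have h2 : (a :: b :: d :: v).length ≤ 2 := by rw [hw]; simp; omega
            simp at h2
    · -- non_write = True: current chunk is a supernet; inside = false
      simp only [if_true] at habas hbabs
      have hbabs' : ∀ p, p ∈ babs ↔ pvOcc (hyper ++ []) p := by
        intro p; rw [List.append_nil]; exact (hbabs p).trans (by rw [List.append_nil])
      rcases w with _ | ⟨a, t⟩
      · refine ⟨rfl, hwin, fun p => ?_, fun p => hbabs' p⟩
        show p ∈ abas ↔ pvOcc (non ++ [chunk ++ [x]]) p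
        exact pv_keep_iff_short abas non chunk [] x hw (by simp) habas p
      · rcases t with _ | ⟨b, u⟩
        · refine ⟨rfl, hwin, fun p => ?_, fun p => hbabs' p⟩
          show p ∈ abas ↔ pvOcc (non ++ [chunk ++ [x]]) p
          exact pv_keep_iff_short abas non chunk [a] x hw (by simp) habas p
        · rcases u with _ | ⟨d, v⟩
          · by_cases hcond : a = x ∧ a ≠ b
            · refine ⟨rfl, hwin, fun p => ?_, fun p => ?_⟩
              · show p ∈ (if a = x ∧ a ≠ b then (PySem.Set.add abas (x, b), babs) else (abas, babs)).1
                    ↔ pvOcc (non ++ [chunk ++ [x]]) p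
                rw [if_pos hcond]
                exact pv_add_iff abas non chunk x a b hw.symm hcond.1 hcond.2 habas p
              · show p ∈ (if a = x ∧ a ≠ b then (PySem.Set.add abas (x, b), babs) else (abas, babs)).2
                    ↔ pvOcc (hyper ++ []) p
                rw [if_pos hcond]
                exact hbabs' p
            · refine ⟨rfl, hwin, fun p => ?_, fun p => ?_⟩
              · show p ∈ (if a = x ∧ a ≠ b then (PySem.Set.add abas (x, b), babs) else (abas, babs)).1
                    ↔ pvOcc (non ++ [chunk ++ [x]]) p
                rw [if_neg hcond]
                exact pv_keep_iff_two abas non chunk x a b hw.symm hcond habas p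
              · show p ∈ (if a = x ∧ a ≠ b then (PySem.Set.add abas (x, b), babs) else (abas, babs)).2
                    ↔ pvOcc (hyper ++ []) p
                rw [if_neg hcond]
                exact hbabs' p
          · exfalso
            have h2 : (a :: b :: d :: v).length ≤ 2 := by rw [hw]; simp; omega
            simp at h2

theorem pvR_foldl (cs : List Char) (sa : List (List Char) × List (List Char) × Bool × List Char)
    (sb : PySem.Set (Char × Char) × PySem.Set (Char × Char) × Bool × List Char)
    (h : pvR sa sb) : pvR (cs.foldl pvStepA sa) (cs.foldl pvStepB sb) := by
  induction cs generalizing sa sb with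
  | nil => exact h
  | cons c cs ih => exact ih _ _ (pvR_step _ _ h c)

theorem pv_inv (a b : Char) : get_ABA_inverse [a, b, a] = [b, a, b] := rfl

theorem pv_A_iff (N H : List (List Char)) :
    ((get_ABAs N).any (fun aba => (get_ABAs H).contains (get_ABA_inverse aba)) = true)
      ↔ ∃ p : Char × Char, pvOcc N p ∧ pvOcc H (p.2, p.1) := by
  rw [List.any_eq_true]
  constructor
  · rintro ⟨aba, hmem, hcont⟩
    obtain ⟨a, b, rfl, hab, hs⟩ := (pv_mem_get_ABAs N aba).mp hmem
    rw [pv_inv] at hcont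
    obtain ⟨a', b', heq, hab', hs'⟩ := (pv_mem_get_ABAs H _).mp (List.contains_iff_mem.mp hcont)
    obtain ⟨rfl, rfl, -⟩ : b = a' ∧ a = b' ∧ b = a' := by simpa using heq
    exact ⟨(a, b), ⟨hab, hs⟩, ⟨hab', hs'⟩⟩
  · rintro ⟨⟨a, b⟩, ⟨hab, hs⟩, ⟨hba, hs'⟩⟩
    refine ⟨[a, b, a], (pv_mem_get_ABAs N _).mpr ⟨a, b, rfl, hab, hs⟩, ?_⟩
    rw [pv_inv]
    exact List.contains_iff_mem.mpr ((pv_mem_get_ABAs H _).mpr ⟨b, a, rfl, hba, hs'⟩)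

theorem pv_B_iff (abas babs : PySem.Set (Char × Char)) :
    (abas.any (fun ab => PySem.Set.contains babs (ab.2, ab.1)) = true)
      ↔ ∃ p ∈ abas, (p.2, p.1) ∈ babs := by
  rw [List.any_eq_true]
  refine exists_congr fun p => and_congr_right fun _ => ?_
  show PySem.Set.contains babs (p.2, p.1) = true ↔ _
  rw [PySem.Set.contains]
  exact List.contains_iff_mem

theorem pv_main (code : String) :
    does_code_support_SSL code = does_code_support_SSL_alt code := by
  unfold does_code_support_SSL does_code_support_SSL_alt split_hypernets
  have hinit : pvR ([], [], true, []) (PySem.Set.empty, PySem.Set.empty, false, []) := by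
    refine ⟨rfl, rfl, fun p => ?_, fun p => ?_⟩
    · show p ∈ ([] : PySem.Set (Char × Char)) ↔ pvOcc ([] ++ [[]]) p
      simp [pvOcc]
    · show p ∈ ([] : PySem.Set (Char × Char)) ↔ pvOcc ([] ++ []) p
      simp [pvOcc]
  have hR := pvR_foldl code.toList _ _ hinit
  rcases hA : code.toList.foldl pvStepA ([], [], true, []) with ⟨non, hyper, nw, chunk⟩
  rcases hB : code.toList.foldl pvStepB (PySem.Set.empty, PySem.Set.empty, false, []) with ⟨abas, babs, ins, w⟩
  rw [hA, hB] at hR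
  obtain ⟨hin, hw, habas, hbabs⟩ := hR
  simp only at hin hw habas hbabs
  dsimp only
  have key : ∀ (N H : List (List Char)), (∀ p, p ∈ abas ↔ pvOcc N p) → (∀ p, p ∈ babs ↔ pvOcc H p) →
      ((get_ABAs N).any (fun aba => (get_ABAs H).contains (get_ABA_inverse aba))
        = abas.any (fun ab => PySem.Set.contains babs (ab.2, ab.1))) := by
    intro N H hN hH
    rw [Bool.eq_iff_iff, pv_A_iff, pv_B_iff]
    exact ⟨fun ⟨p, h1, h2⟩ => ⟨p, (hN p).mpr h1, (hH _).mpr h2⟩,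
           fun ⟨p, h1, h2⟩ => ⟨p, (hN p).mp h1, (hH _).mp h2⟩⟩
  by_cases hc : chunk.length > 0
  · rw [if_pos hc]
    cases nw
    · simp only [Bool.false_eq_true, if_false] at habas hbabs ⊢
      exact key non (hyper ++ [chunk]) (fun p => (habas p).trans (by rw [List.append_nil])) hbabs
    · simp only [if_true] at habas hbabs ⊢
      exact key (non ++ [chunk]) hyper habas (fun p => (hbabs p).trans (by rw [List.append_nil]))
  · rw [if_neg hc]
    have hnil : chunk = [] := List.eq_nil_of_length_eq_zero (by omega)
    subst hnil
    cases nw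
    · simp only [Bool.false_eq_true, if_false] at habas hbabs
      exact key non hyper (fun p => (habas p).trans (by rw [List.append_nil]))
        (fun p => (hbabs p).trans (pvOcc_append_nil hyper p))
    · simp only [if_true] at habas hbabs
      exact key non hyper (fun p => (habas p).trans (pvOcc_append_nil non p))
        (fun p => (hbabs p).trans (by rw [List.append_nil]))

-- ===== VERDICT (by name: the statement is the Claim_ definition above) =====
theorem does_code_support_SSL_spec : Claim_equal_does_code_support_SSL := by
  intro code _
  unfold Spec_does_code_support_SSL
  exact pv_main code
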